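-- pv_equiv track=rewrite | github.com/DailyForkCast/osint-foresight | scripts/analysis/risk_assessment_helper.py | assess_technology_risk
-- ===== SOURCE A (Python) =====
-- def assess_technology_risk(technologies, tech_config):
--     """Assess risk level based on technology categories"""
--     if not technologies:
--         return "LOW"
--
--     for risk_level in ["CRITICAL", "HIGH", "MEDIUM"]:
--         critical_techs = tech_config.get("dual_use_technologies", {}).get(risk_level, [])
--         if any(tech in critical_techs for tech in technologies):
--             return risk_level
--
--     return "LOW"
-- ===== SOURCE B (Python) =====
-- def _rank(level):
--     return {"LOW": 0, "MEDIUM": 1, "HIGH": 2, "CRITICAL": 3}.get(level, 0)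
--
--
-- def assess_technology_risk(technologies, tech_config):
--     """Assess risk level based on technology categories"""
--     if not technologies:
--         return "LOW"
--
--     dual_use = tech_config.get("dual_use_technologies", {})
--     # inverted index: technology -> strongest risk level (first-wins in priority order)
--     index = {}
--     for level in ["CRITICAL", "HIGH", "MEDIUM"]:
--         for tech in dual_use.get(level, []):
--             index.setdefault(tech, level)
--
--     best = "LOW"
--     for tech in technologies:
--         lvl = index.get(tech, "LOW")
--         if _rank(best) < _rank(lvl):
--             best = lvl
--     return best
-- ===== Notes on version B (the rewrite author's own statement) =====
-- stated objective: alternative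
-- what changed: Instead of scanning the whole technologies list once per risk level, B builds an inverted index mapping each technology to its strongest risk level (first-wins in CRITICAL>HIGH>MEDIUM order) and then makes a single max-tracking pass over technologies.
import Mathlib
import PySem

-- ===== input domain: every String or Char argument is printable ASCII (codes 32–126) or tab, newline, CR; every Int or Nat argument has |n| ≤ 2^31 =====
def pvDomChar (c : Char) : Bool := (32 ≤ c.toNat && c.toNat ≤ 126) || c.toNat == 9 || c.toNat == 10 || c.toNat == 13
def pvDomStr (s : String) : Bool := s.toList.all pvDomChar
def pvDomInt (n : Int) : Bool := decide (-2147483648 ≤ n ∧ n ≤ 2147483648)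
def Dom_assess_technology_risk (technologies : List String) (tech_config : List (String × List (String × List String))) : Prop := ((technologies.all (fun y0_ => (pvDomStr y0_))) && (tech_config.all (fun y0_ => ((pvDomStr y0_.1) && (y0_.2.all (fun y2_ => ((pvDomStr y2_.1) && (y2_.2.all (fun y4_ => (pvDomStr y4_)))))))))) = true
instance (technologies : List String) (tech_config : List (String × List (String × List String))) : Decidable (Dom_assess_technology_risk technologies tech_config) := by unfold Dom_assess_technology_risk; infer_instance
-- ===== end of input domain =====

-- B replaces the per-level rescans of `technologies` by an inverted index (technology -> strongest
-- level, first-wins in priority order) plus one max-tracking pass; alternative decomposition, same result.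


-- ===== PORT A =====
-- the `for risk_level in ["CRITICAL", "HIGH", "MEDIUM"]` loop with early return
def atrLoop (technologies : List String) (dut : PySem.Dict String (List String)) : List String → String
  | [] => "LOW"
  | l :: rest =>
    if technologies.any (fun t => (dut.getD l []).contains t) then l
    else atrLoop technologies dut rest

def assess_technology_risk (technologies : List String) (tech_config : List (String × List (String × List String))) : String :=
  if technologies = [] then "LOW"
  else atrLoop technologies
        (PySem.Dict.mk ((PySem.Dict.mk tech_config).getD "dual_use_technologies" []))
        ["CRITICAL", "HIGH", "MEDIUM"]

-- ===== PORT B =====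
def atrRank (level : String) : Int :=
  (PySem.Dict.mk [("LOW", (0 : Int)), ("MEDIUM", 1), ("HIGH", 2), ("CRITICAL", 3)]).getD level 0

-- inverted index: technology -> strongest level, setdefault so the first (strongest) level wins
def atrIndex (dut : PySem.Dict String (List String)) : PySem.Dict String String :=
  ["CRITICAL", "HIGH", "MEDIUM"].foldl
    (fun idx l => (dut.getD l []).foldl (fun idx t => idx.setdefault t l) idx)
    PySem.Dict.empty

def assess_technology_risk_alt (technologies : List String) (tech_config : List (String × List (String × List String))) : String :=
  if technologies = [] then "LOW"
  else
    let dut := PySem.Dict.mk ((PySem.Dict.mk tech_config).getD "dual_use_technologies" [])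
    let idx := atrIndex dut
    technologies.foldl
      (fun best t =>
        let lvl := idx.getD t "LOW"
        if atrRank best < atrRank lvl then lvl else best)
      "LOW"

-- ===== PRECONDITION & SPEC =====
def Spec_assess_technology_risk (technologies : List String) (tech_config : List (String × List (String × List String))) (out : String) : Prop := out = assess_technology_risk_alt technologies tech_config
instance (technologies : List String) (tech_config : List (String × List (String × List String))) (out : String) : Decidable (Spec_assess_technology_risk technologies tech_config out) := by unfold Spec_assess_technology_risk; infer_instance

-- ===== CLAIM (what is proved, stated in full; the proofs are below) =====
def Claim_equal_assess_technology_risk : Prop := ∀ (technologies : List String) (tech_config : List (String × List (String × List String))), Dom_assess_technology_risk technologies tech_config → Spec_assess_technology_risk technologies tech_config (assess_technology_risk technologies tech_config)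

-- ===== LEMMAS AND PROOFS =====

-- what one setdefault loop adds to the index
theorem get?_setdefault_foldl (L : List String) (d : PySem.Dict String String) (l x : String) :
    (L.foldl (fun idx t => idx.setdefault t l) d).get? x
      = ((d.get? x).or (if L.contains x then some l else none)) := by
  induction L generalizing d with
  | nil => simp
  | cons t L ih =>
    simp only [List.foldl_cons, ih]
    by_cases hc : d.contains t = true
    · rw [PySem.Dict.setdefault_of_contains _ _ hc]
      by_cases hx : x = t
      · subst hx
        rcases h : d.get? x with _ | v
        · rw [PySem.Dict.contains_eq_isSome_get?] at hc
          simp [h] at hc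
        · simp
      · simp [hx]
    · rw [PySem.Dict.setdefault_of_not_contains _ _ (by simpa using hc)]
      by_cases hx : x = t
      · subst hx
        rw [PySem.Dict.contains_eq_isSome_get?] at hc
        rcases h : d.get? x with _ | v
        · simp [PySem.Dict.get?_insert]
        · simp [h] at hc
      · simp [PySem.Dict.get?_insert, hx]

-- the one-of-four risk names every tracked value belongs to
def S4 (s : String) : Prop := s = "LOW" ∨ s = "MEDIUM" ∨ s = "HIGH" ∨ s = "CRITICAL"

-- what the index lookup (with default "LOW") computes, as a plain if-chain
def lkF (C H M : List String) (t : String) : String :=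
  if C.contains t then "CRITICAL" else if H.contains t then "HIGH"
  else if M.contains t then "MEDIUM" else "LOW"

theorem getD_atrIndex (dut : PySem.Dict String (List String)) (t : String) :
    (atrIndex dut).getD t "LOW"
      = lkF (dut.getD "CRITICAL" []) (dut.getD "HIGH" []) (dut.getD "MEDIUM" []) t := by
  unfold atrIndex lkF
  simp only [List.foldl_cons, List.foldl_nil]
  rw [PySem.Dict.getD_eq_get?_getD, get?_setdefault_foldl, get?_setdefault_foldl,
      get?_setdefault_foldl]
  simp only [PySem.Dict.get?_empty, Option.none_or]
  split_ifs <;> simp_all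

def lmax (a b : String) : String := if atrRank a < atrRank b then b else a

-- the value A returns on a nonempty list
def AChain (C H M : List String) (ts : List String) : String :=
  if ts.any (fun t => C.contains t) then "CRITICAL"
  else if ts.any (fun t => H.contains t) then "HIGH"
  else if ts.any (fun t => M.contains t) then "MEDIUM" else "LOW"

theorem lkF_S4 (C H M : List String) (t : String) : S4 (lkF C H M t) := by
  unfold lkF S4; split_ifs <;> simp

theorem AChain_S4 (C H M ts : List String) : S4 (AChain C H M ts) := by
  unfold AChain S4; split_ifs <;> simp

theorem lmax_S4 {a b : String} (ha : S4 a) (hb : S4 b) : S4 (lmax a b) := by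
  unfold lmax; split_ifs <;> assumption

theorem lmax_low {a : String} (ha : S4 a) : lmax a "LOW" = a := by
  rcases ha with rfl | rfl | rfl | rfl <;> rfl

theorem lmax_low_left {a : String} (ha : S4 a) : lmax "LOW" a = a := by
  rcases ha with rfl | rfl | rfl | rfl <;> rfl

theorem lmax_assoc {a b c : String} (ha : S4 a) (hb : S4 b) (hc : S4 c) :
    lmax (lmax a b) c = lmax a (lmax b c) := by
  rcases ha with rfl | rfl | rfl | rfl <;> rcases hb with rfl | rfl | rfl | rfl <;>
    rcases hc with rfl | rfl | rfl | rfl <;> rfl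

set_option maxHeartbeats 1000000 in
theorem AChain_cons (C H M : List String) (t : String) (ts : List String) :
    AChain C H M (t :: ts) = lmax (lkF C H M t) (AChain C H M ts) := by
  cases h1 : C.contains t <;> cases h2 : H.contains t <;> cases h3 : M.contains t <;>
    cases g1 : (ts.any fun t => C.contains t) <;>
    cases g2 : (ts.any fun t => H.contains t) <;>
    cases g3 : (ts.any fun t => M.contains t) <;>
      simp only [AChain, lkF, lmax, List.any_cons, h1, h2, h3, g1, g2, g3] <;> decide

theorem fold_lmax (C H M : List String) (ts : List String) :
    ∀ b : String, S4 b →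
      ts.foldl (fun best t => lmax best (lkF C H M t)) b = lmax b (AChain C H M ts) := by
  induction ts with
  | nil => intro b hb; simp [AChain, lmax_low hb]
  | cons t ts ih =>
    intro b hb
    simp only [List.foldl_cons]
    rw [ih _ (lmax_S4 hb (lkF_S4 C H M t)), AChain_cons,
        lmax_assoc hb (lkF_S4 C H M t) (AChain_S4 C H M ts)]

theorem atrLoop_eq_AChain (ts : List String) (dut : PySem.Dict String (List String)) :
    atrLoop ts dut ["CRITICAL", "HIGH", "MEDIUM"]
      = AChain (dut.getD "CRITICAL" []) (dut.getD "HIGH" []) (dut.getD "MEDIUM" []) ts := by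
  simp only [atrLoop, AChain]

-- ===== VERDICT (by name: the statement is the Claim_ definition above) =====
theorem assess_technology_risk_spec : Claim_equal_assess_technology_risk := by
  intro ts cfg _
  unfold Spec_assess_technology_risk assess_technology_risk assess_technology_risk_alt
  by_cases h : ts = []
  · simp [h]
  · rw [if_neg h, if_neg h]
    set dut := PySem.Dict.mk ((PySem.Dict.mk cfg).getD "dual_use_technologies" []) with hd
    rw [atrLoop_eq_AChain]
    have : ts.foldl
        (fun best t =>
          let lvl := (atrIndex dut).getD t "LOW"
          if atrRank best < atrRank lvl then lvl else best) "LOW"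
      = ts.foldl (fun best t =>
          lmax best (lkF (dut.getD "CRITICAL" []) (dut.getD "HIGH" []) (dut.getD "MEDIUM" []) t)) "LOW" := by
      apply PySem.List.foldl_congr_mem
      intro b t _; simp only [getD_atrIndex, lmax]
    rw [this, fold_lmax _ _ _ _ _ (by left; rfl),
        lmax_low_left (AChain_S4 _ _ _ _)]
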